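-- pv_equiv track=rewrite | github.com/abbasmoosajee07/AdventofCode | 2024/19/2024Day19.py | count_ways_to_build
-- ===== SOURCE A (Python) =====
-- def count_ways_to_build(target_string, word_list, memo):
--     if target_string in memo:
--         return memo[target_string], memo
--
--     total_ways = 0
--     if not target_string:
--         total_ways = 1
--
--     for word in word_list:
--         if target_string.startswith(word):
--             ways, memo = count_ways_to_build(target_string[len(word):], word_list, memo)
--             total_ways += ways
--
--     memo[target_string] = total_ways
--     return total_ways, memo
-- ===== SOURCE B (Python) =====
-- def count_ways_to_build(target_string, word_list, memo):
--     # index words by first character once, then memoized DFS over suffixes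
--     # scans only the matching bucket at each position
--     buckets = {}
--     for w in word_list:
--         if w:
--             buckets.setdefault(w[0], []).append(w)
--
--     def go(s, memo):
--         if s in memo:
--             return memo[s], memo
--         if not s:
--             total = 1
--         else:
--             total = 0
--             for w in buckets.get(s[0], []):
--                 if s.startswith(w):
--                     ways, memo = go(s[len(w):], memo)
--                     total += ways
--         memo[s] = total
--         return total, memo
--
--     return go(target_string, memo)
-- ===== Notes on version B (the rewrite author's own statement) =====
-- stated objective: faster
-- what changed: B builds a first-character index of the word list once and runs the memoized DFS over suffixes against only the matching bucket, instead of rescanning the whole word list at every suffix.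
import Mathlib
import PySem

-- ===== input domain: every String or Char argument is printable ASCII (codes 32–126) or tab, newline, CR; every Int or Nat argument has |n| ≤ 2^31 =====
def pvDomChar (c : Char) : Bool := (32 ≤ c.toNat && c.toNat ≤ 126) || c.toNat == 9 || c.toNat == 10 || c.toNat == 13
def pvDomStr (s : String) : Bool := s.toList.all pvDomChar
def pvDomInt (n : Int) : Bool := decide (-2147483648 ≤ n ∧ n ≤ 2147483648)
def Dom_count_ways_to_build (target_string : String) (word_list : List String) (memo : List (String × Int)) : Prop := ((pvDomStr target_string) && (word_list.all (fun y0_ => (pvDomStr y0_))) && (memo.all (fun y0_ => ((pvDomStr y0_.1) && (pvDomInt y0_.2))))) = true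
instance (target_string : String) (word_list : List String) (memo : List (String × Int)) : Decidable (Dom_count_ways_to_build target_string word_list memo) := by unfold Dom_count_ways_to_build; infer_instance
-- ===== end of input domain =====

-- B indexes the word list by first character once, so the per-suffix scan only touches the matching bucket
-- (objective: faster by a constant factor, measured; both mutate the Python memo dict in place — the same side effect).

-- ===== PORT A =====
-- fuel = |target| + 1 is a totality guard only: under Pre_ ("" not among the words, or the target
-- is already memoized) it never runs out, each recursive call strictly shortens the suffix.
def countWaysA : Nat → String → List String → PySem.Dict String Int → Int × PySem.Dict String Int
  | 0, _, _, d => (0, d)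
  | fuel+1, t, ws, d =>
    match d.get? t with
    | some v => (v, d)
    | none =>
      let st := ws.foldl
        (fun (st : Int × PySem.Dict String Int) w =>
          if PySem.Str.startswith t w then
            let r := countWaysA fuel (PySem.Str.slice t (some (PySem.Str.len w)) none) ws st.2
            (st.1 + r.1, r.2)
          else st)
        ((if t = "" then (1:Int) else 0), d)
      (st.1, st.2.insert t st.1)

def count_ways_to_build (target_string : String) (word_list : List String) (memo : List (String × Int)) : Int × (List (String × Int)) :=
  let r := countWaysA (target_string.toList.length + 1) target_string word_list (PySem.Dict.mk memo)
  (r.1, r.2.items)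

-- ===== PORT B =====
-- 'buckets.setdefault(w[0], []).append(w)' = modify at the first character (exact: key inserted at
-- the end when absent, value list extended in place).
def buildBuckets (ws : List String) : PySem.Dict Char (List String) :=
  ws.foldl
    (fun b w =>
      match w.toList with
      | [] => b
      | c :: _ => b.modify c [] (fun l => l ++ [w]))
    PySem.Dict.empty

def goB (buckets : PySem.Dict Char (List String)) : Nat → String → PySem.Dict String Int → Int × PySem.Dict String Int
  | 0, _, d => (0, d)
  | fuel+1, s, d =>
    match d.get? s with
    | some v => (v, d)
    | none =>
      let st :=
        match s.toList with
        | [] => ((1:Int), d)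
        | c :: _ =>
          (buckets.getD c []).foldl
            (fun (st : Int × PySem.Dict String Int) w =>
              if PySem.Str.startswith s w then
                let r := goB buckets fuel (PySem.Str.slice s (some (PySem.Str.len w)) none) st.2
                (st.1 + r.1, r.2)
              else st)
            (0, d)
      (st.1, st.2.insert s st.1)

def count_ways_to_build_alt (target_string : String) (word_list : List String) (memo : List (String × Int)) : Int × (List (String × Int)) :=
  let buckets := buildBuckets word_list
  let r := goB buckets (target_string.toList.length + 1) target_string (PySem.Dict.mk memo)
  (r.1, r.2.items)

-- ===== PRECONDITION & SPEC =====
-- Pre_ excludes exactly the inputs on which A raises RecursionError: with "" among the words every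
-- non-memoized call recurses on the identical target string forever; if the target is memoized A
-- returns at once and the empty word is harmless.
def Pre_count_ways_to_build (target_string : String) (word_list : List String) (memo : List (String × Int)) : Prop :=
  "" ∉ word_list ∨ (PySem.Dict.mk memo).contains target_string = true
instance (target_string : String) (word_list : List String) (memo : List (String × Int)) : Decidable (Pre_count_ways_to_build target_string word_list memo) := by unfold Pre_count_ways_to_build; infer_instance

def pvWitness_count_ways_to_build : String × List String × (List (String × Int)) := ("abab", ["a", "ab", "b"], [])

def Spec_count_ways_to_build (target_string : String) (word_list : List String) (memo : List (String × Int)) (out : Int × (List (String × Int))) : Prop := out = count_ways_to_build_alt target_string word_list memo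
instance (target_string : String) (word_list : List String) (memo : List (String × Int)) (out : Int × (List (String × Int))) : Decidable (Spec_count_ways_to_build target_string word_list memo out) := by unfold Spec_count_ways_to_build; infer_instance

-- ===== CLAIM (what is proved, stated in full; the proofs are below) =====
def Claim_equal_count_ways_to_build : Prop := ∀ (target_string : String) (word_list : List String) (memo : List (String × Int)), Dom_count_ways_to_build target_string word_list memo → Pre_count_ways_to_build target_string word_list memo → Spec_count_ways_to_build target_string word_list memo (count_ways_to_build target_string word_list memo)

-- ===== LEMMAS AND PROOFS =====

-- a nonempty word is never a prefix of the empty suffix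
lemma chars_startswith_nil_false (w : List Char) (hw : w ≠ []) :
    PySem.Chars.startswith [] w = false := by
  rw [Bool.eq_false_iff]
  intro hb
  exact hw (List.prefix_nil.mp ((PySem.Chars.startswith_iff _ _).mp hb))

-- a word whose first character differs never matches
lemma chars_startswith_false (c c' : Char) (rest tl : List Char) (h : c' ≠ c) :
    PySem.Chars.startswith (c :: rest) (c' :: tl) = false := by
  rw [Bool.eq_false_iff]
  intro hb
  rcases (PySem.Chars.startswith_iff _ _).mp hb with ⟨r, hr⟩
  exact h (by simpa using congrArg List.head? hr)

-- the suffix after removing a matched word, on the list side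
lemma toList_slice_len (s w : String) :
    (PySem.Str.slice s (some (PySem.Str.len w)) none).toList = s.toList.drop w.toList.length := by
  rw [PySem.Str.toList_slice, PySem.Chars.slice_eq_listSlice, PySem.Str.len_eq,
    PySem.List.slice_from_natCast]

-- the bucket of character c holds exactly the words starting with c, in order
lemma buildBuckets_getD (ws : List String) (c : Char) :
    (buildBuckets ws).getD c [] = ws.filter (fun w => w.toList.head? == some c) := by
  suffices h : ∀ (b : PySem.Dict Char (List String)),
      (ws.foldl
        (fun b w =>
          match w.toList with
          | [] => b
          | c :: _ => b.modify c [] (fun l => l ++ [w])) b).getD c []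
      = b.getD c [] ++ ws.filter (fun w => w.toList.head? == some c) by
    simpa [buildBuckets] using h PySem.Dict.empty
  induction ws with
  | nil => intro b; simp
  | cons w ws ih =>
    intro b
    rcases hw : w.toList with _ | ⟨c', tl⟩
    · simp [List.foldl_cons, hw, ih b]
    · by_cases hc : c = c'
      · subst hc
        simp [List.foldl_cons, hw, ih]
      · simp [List.foldl_cons, hw, ih, PySem.Dict.getD_modify, hc, Ne.symm hc]

-- main equivalence of the two memoized searches, by induction on the fuel
lemma main_equiv (ws : List String) (hws : "" ∉ ws) :
    ∀ (fuel : Nat) (s : String) (d : PySem.Dict String Int),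
      s.toList.length + 1 ≤ fuel →
      countWaysA fuel s ws d = goB (buildBuckets ws) fuel s d := by
  intro fuel
  induction fuel with
  | zero => intro s d h; omega
  | succ fuel ih =>
    intro s d hlen
    simp only [countWaysA, goB]
    cases hget : d.get? s with
    | some v => rfl
    | none =>
      rcases hs : s.toList with _ | ⟨c, rest⟩
      · -- empty target: the word loop is a no-op on both sides
        have hse : s = "" := String.toList_eq_nil_iff.mp hs
        subst hse
        have hnoop : ∀ (st : Int × PySem.Dict String Int), ∀ w ∈ ws,
            (if PySem.Str.startswith "" w then
                let r := countWaysA fuel (PySem.Str.slice "" (some (PySem.Str.len w)) none) ws st.2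
                (st.1 + r.1, r.2)
              else st) = st := by
          intro st w hwmem
          have hne : w.toList ≠ [] :=
            fun he => hws ((String.toList_eq_nil_iff.mp he) ▸ hwmem)
          rw [if_neg]
          rw [PySem.Str.startswith_eq]
          simp [chars_startswith_nil_false w.toList hne, hs]
        rw [PySem.List.foldl_congr_mem ws _ (fun st _ => st) _ hnoop, List.foldl_fixed]
        simp
      · -- nonempty target: A's scan of all words equals B's scan of the first-character bucket
        have hne : s ≠ "" := fun he => by simp [he] at hs
        have hstep : ∀ (st : Int × PySem.Dict String Int), ∀ w ∈ ws,
            (if PySem.Str.startswith s w then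
                let r := countWaysA fuel (PySem.Str.slice s (some (PySem.Str.len w)) none) ws st.2
                (st.1 + r.1, r.2)
              else st)
            = (if (w.toList.head? == some c) then
                (if PySem.Str.startswith s w then
                  let r := goB (buildBuckets ws) fuel (PySem.Str.slice s (some (PySem.Str.len w)) none) st.2
                  (st.1 + r.1, r.2)
                else st)
              else st) := by
          intro st w hwmem
          have hwne : w ≠ "" := fun he => hws (he ▸ hwmem)
          by_cases hp : w.toList.head? = some c
          · have hwlen : 1 ≤ w.toList.length := by
              rcases hwl : w.toList with _ | _
              · simp [hwl] at hp
              · simp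
            have hslen : (PySem.Str.slice s (some (PySem.Str.len w)) none).toList.length + 1 ≤ fuel := by
              rw [toList_slice_len]
              have h1 : s.toList.length = rest.length + 1 := by rw [hs]; simp
              simp only [List.length_drop]
              omega
            have hIH := ih (PySem.Str.slice s (some (PySem.Str.len w)) none) st.2 hslen
            simp at hIH
            simp [hp, hIH]
          · have hfa : PySem.Str.startswith s w = false := by
              rw [PySem.Str.startswith_eq, hs]
              rcases hwl : w.toList with _ | ⟨c', tl⟩
              · exact absurd (String.toList_eq_nil_iff.mp hwl) hwne
              · exact chars_startswith_false _ _ _ _ (fun he => hp (by simp [hwl, he]))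
            have hpb : (w.toList.head? == some c) = false := by simp [hp]
            simp at hfa
            simp [hfa, hpb]
        rw [PySem.List.foldl_congr_mem ws _ _ _ hstep, if_neg hne]
        rw [← List.foldl_filter, ← buildBuckets_getD]

-- with the target already memoized both functions return at once
lemma memo_hit (fuel : Nat) (s : String) (ws : List String) (d : PySem.Dict String Int) (v : Int)
    (h : d.get? s = some v) :
    countWaysA (fuel + 1) s ws d = (v, d) ∧
      ∀ buckets, goB buckets (fuel + 1) s d = (v, d) := by
  constructor
  · simp [countWaysA, h]
  · intro buckets; simp [goB, h]

-- ===== VERDICT (by name: the statement is the Claim_ definition above) =====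
theorem count_ways_to_build_spec : Claim_equal_count_ways_to_build := by
  intro t ws memo _hdom hpre
  unfold Spec_count_ways_to_build count_ways_to_build count_ways_to_build_alt
  rcases hpre with h | h
  · rw [main_equiv ws h (t.toList.length + 1) t (PySem.Dict.mk memo) (by omega)]
  · rw [PySem.Dict.contains_eq_isSome_get?] at h
    rcases hv : (PySem.Dict.mk memo).get? t with _ | v
    · rw [hv] at h; simp at h
    · obtain ⟨h1, h2⟩ := memo_hit t.toList.length t ws (PySem.Dict.mk memo) v hv
      rw [h1]
      simp only [h2]
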